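-- pv_equiv track=rewrite | github.com/ThuckMaBaws/TMB-Nodes | lora_example_prompt.py | detect_model
-- ===== SOURCE A (Python) =====
-- def detect_model(name):
--     name = name.lower()
--
--     if any(keyword in name for keyword in ["illustrious", "illubase", "illu", "illust"]):
--         return "Illustrious"
--     elif "xl" in name or "sdxl" in name or "v1-5-xl" in name or "xl_base" in name:
--         return "SDXL"
--     elif "1.5" in name or "v1-5" in name or "sd15" in name:
--         return "SD1.5"
--     elif "2.1" in name or "v2" in name or "sd21" in name:
--         return "SD2.1"
--     elif "flux" in name:
--         return "Flux"
--     elif "other" in name or "misc" in name: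
--         return "Other"
--     else:
--         return "Unknown"
-- ===== SOURCE B (Python) =====
-- _LABELS = ["Illustrious", "SDXL", "SD1.5", "SD2.1", "Flux", "Other", "Unknown"]
--
-- _KW = [
--     ("illustrious", 0), ("illubase", 0), ("illu", 0), ("illust", 0),
--     ("xl", 1), ("sdxl", 1), ("v1-5-xl", 1), ("xl_base", 1),
--     ("1.5", 2), ("v1-5", 2), ("sd15", 2),
--     ("2.1", 3), ("v2", 3), ("sd21", 3),
--     ("flux", 4),
--     ("other", 5), ("misc", 5),
-- ]
--
-- def detect_model(name):
--     # Single left-to-right sweep over the string: at each position, improve the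
--     # best (lowest) priority of any keyword starting there; one lookup at the end.
--     low = name.lower()
--     best = 6
--     for i in range(len(low)):
--         for kw, p in _KW:
--             if p < best and low.startswith(kw, i):
--                 best = p
--     return _LABELS[best]
-- ===== Notes on version B (the rewrite author's own statement) =====
-- stated objective: alternative
-- what changed: Instead of running a separate substring search per keyword through an if-elif chain, B makes a single left-to-right sweep over the lowered string, at each position improving the best (lowest) priority of any keyword that starts there, and maps the final priority to its label once at the end.
import Mathlib
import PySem

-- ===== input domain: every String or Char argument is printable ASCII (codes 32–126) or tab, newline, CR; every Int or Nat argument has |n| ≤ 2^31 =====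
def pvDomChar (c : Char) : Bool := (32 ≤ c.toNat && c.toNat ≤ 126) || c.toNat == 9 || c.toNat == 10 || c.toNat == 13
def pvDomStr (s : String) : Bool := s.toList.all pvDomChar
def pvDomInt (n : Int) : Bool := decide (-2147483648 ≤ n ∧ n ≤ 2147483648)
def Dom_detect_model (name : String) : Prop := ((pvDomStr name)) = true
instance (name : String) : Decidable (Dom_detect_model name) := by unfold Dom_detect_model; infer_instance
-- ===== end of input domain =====

-- B replaces A's per-keyword substring searches by a single left-to-right sweep over the
-- string that keeps the best (lowest) matched priority, with one label lookup at the end.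

-- ===== PORT A =====
def detect_model (name : String) : String :=
  let name := PySem.Str.lower name
  if ["illustrious", "illubase", "illu", "illust"].any (fun keyword => PySem.Str.isIn keyword name) then
    "Illustrious"
  else if PySem.Str.isIn "xl" name || PySem.Str.isIn "sdxl" name || PySem.Str.isIn "v1-5-xl" name || PySem.Str.isIn "xl_base" name then
    "SDXL"
  else if PySem.Str.isIn "1.5" name || PySem.Str.isIn "v1-5" name || PySem.Str.isIn "sd15" name then
    "SD1.5"
  else if PySem.Str.isIn "2.1" name || PySem.Str.isIn "v2" name || PySem.Str.isIn "sd21" name then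
    "SD2.1"
  else if PySem.Str.isIn "flux" name then
    "Flux"
  else if PySem.Str.isIn "other" name || PySem.Str.isIn "misc" name then
    "Other"
  else
    "Unknown"

-- ===== PORT B =====
def labelsList : List String :=
  ["Illustrious", "SDXL", "SD1.5", "SD2.1", "Flux", "Other", "Unknown"]

def kwTable : List (String × Nat) :=
  [ ("illustrious", 0), ("illubase", 0), ("illu", 0), ("illust", 0),
    ("xl", 1), ("sdxl", 1), ("v1-5-xl", 1), ("xl_base", 1),
    ("1.5", 2), ("v1-5", 2), ("sd15", 2),
    ("2.1", 3), ("v2", 3), ("sd21", 3),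
    ("flux", 4),
    ("other", 5), ("misc", 5) ]

-- the inner 'for kw, p in _KW' loop at one position (s is the suffix low[i:])
def kwStep (t : List (String × Nat)) (s : List Char) (b : Nat) : Nat :=
  t.foldl (fun b kp => if kp.2 < b && PySem.Chars.startswith s kp.1.toList then kp.2 else b) b

-- the outer 'for i in range(len(low))' loop, one suffix per position
def kwScan (t : List (String × Nat)) : List Char → Nat → Nat
  | [], b => b
  | c :: r, b => kwScan t r (kwStep t (c :: r) b)

def detect_model_alt (name : String) : String :=
  let low := PySem.Str.lower name
  labelsList.getD (kwScan kwTable low.toList 6) "Unknown"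

-- ===== PRECONDITION & SPEC =====
def Spec_detect_model (name : String) (out : String) : Prop := out = detect_model_alt name
instance (name : String) (out : String) : Decidable (Spec_detect_model name out) := by unfold Spec_detect_model; infer_instance

-- ===== CLAIM (what is proved, stated in full; the proofs are below) =====
def Claim_equal_detect_model : Prop := ∀ (name : String), Dom_detect_model name → Spec_detect_model name (detect_model name)

-- ===== LEMMAS AND PROOFS =====

-- proof-only: priority fold over prefix matches of a single suffix
def pFold (t : List (String × Nat)) (s : List Char) (m : Nat) : Nat :=
  t.foldl (fun m kp => if PySem.Chars.startswith s kp.1.toList then min m kp.2 else m) m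

-- proof-only: priority fold over substring matches of the whole string
def minIn (t : List (String × Nat)) (s : List Char) (m : Nat) : Nat :=
  t.foldl (fun m kp => if PySem.Chars.isIn kp.1.toList s then min m kp.2 else m) m

theorem kwStep_cons (kp : String × Nat) (t : List (String × Nat)) (s : List Char) (b : Nat) :
    kwStep (kp :: t) s b
      = kwStep t s (if kp.2 < b && PySem.Chars.startswith s kp.1.toList then kp.2 else b) := rfl

theorem pFold_cons (kp : String × Nat) (t : List (String × Nat)) (s : List Char) (m : Nat) :
    pFold (kp :: t) s m
      = pFold t s (if PySem.Chars.startswith s kp.1.toList then min m kp.2 else m) := rfl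

theorem minIn_cons_entry (kp : String × Nat) (t : List (String × Nat)) (s : List Char) (m : Nat) :
    minIn (kp :: t) s m
      = minIn t s (if PySem.Chars.isIn kp.1.toList s then min m kp.2 else m) := rfl

theorem kwStep_eq_pFold (t : List (String × Nat)) (s : List Char) (b : Nat) :
    kwStep t s b = pFold t s b := by
  induction t generalizing b with
  | nil => rfl
  | cons kp t ih =>
    rw [kwStep_cons, pFold_cons, ih]
    congr 1
    cases h : PySem.Chars.startswith s kp.1.toList
    · simp [h]
    · simp only [h, Bool.and_true, decide_eq_true_eq, if_true]
      rw [Nat.min_def]; split_ifs <;> omega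

theorem pFold_min (t : List (String × Nat)) (s : List Char) (a b : Nat) :
    pFold t s (min a b) = min a (pFold t s b) := by
  induction t generalizing a b with
  | nil => rfl
  | cons kp t ih =>
    rw [pFold_cons, pFold_cons]
    cases h : PySem.Chars.startswith s kp.1.toList
    · simp only [h, Bool.false_eq_true, if_false]
      exact ih a b
    · simp only [h, if_true]
      rw [Nat.min_assoc]; exact ih a _

theorem isIn_cons (k : List Char) (c : Char) (r : List Char) :
    PySem.Chars.isIn k (c :: r)
      = (PySem.Chars.startswith (c :: r) k || PySem.Chars.isIn k r) := by
  rw [Bool.eq_iff_iff, Bool.or_eq_true, PySem.Chars.isIn_iff_infix,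
    PySem.Chars.isIn_iff_infix, PySem.Chars.startswith_iff, List.infix_cons_iff]

theorem minIn_cons (t : List (String × Nat)) (c : Char) (r : List Char) (m : Nat) :
    minIn t (c :: r) m = minIn t r (pFold t (c :: r) m) := by
  induction t generalizing m with
  | nil => rfl
  | cons kp t ih =>
    rw [minIn_cons_entry, minIn_cons_entry, pFold_cons, isIn_cons]
    cases hsw : PySem.Chars.startswith (c :: r) kp.1.toList <;>
      cases hin : PySem.Chars.isIn kp.1.toList r <;>
        simp only [Bool.false_or, Bool.true_or, Bool.false_eq_true, if_false, if_true]
    · exact ih m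
    · rw [ih (min m kp.2)]
      congr 1
      rw [Nat.min_comm m kp.2, pFold_min]
      omega
    · exact ih (min m kp.2)
    · rw [ih (min m kp.2)]
      congr 1
      rw [Nat.min_comm m kp.2, pFold_min]
      omega

theorem minIn_nil (t : List (String × Nat)) (m : Nat)
    (h : ∀ kp ∈ t, kp.1.toList ≠ ([] : List Char)) : minIn t [] m = m := by
  induction t generalizing m with
  | nil => rfl
  | cons kp t ih =>
    rw [minIn_cons_entry]
    have hne := h kp (List.mem_cons_self ..)
    have hf : PySem.Chars.isIn kp.1.toList ([] : List Char) = false := by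
      rw [PySem.Chars.isIn_eq_false_iff]
      intro hinf
      exact hne (List.eq_nil_of_infix_nil hinf)
    rw [hf, if_neg (by simp)]
    exact ih m (fun q hq => h q (List.mem_cons_of_mem _ hq))

theorem kwScan_eq_minIn (t : List (String × Nat))
    (h : ∀ kp ∈ t, kp.1.toList ≠ ([] : List Char)) :
    ∀ (s : List Char) (b : Nat), kwScan t s b = minIn t s b := by
  intro s
  induction s with
  | nil => intro b; exact (minIn_nil t b h).symm
  | cons c r ih =>
    intro b
    rw [show kwScan t (c :: r) b = kwScan t r (kwStep t (c :: r) b) from rfl,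
      ih, kwStep_eq_pFold, ← minIn_cons]

-- the concrete 17-keyword case analysis: the priority fold equals A's if-elif chain
theorem chain_eq (s : List Char) :
    (if (PySem.Chars.isIn "illustrious".toList s || (PySem.Chars.isIn "illubase".toList s ||
          (PySem.Chars.isIn "illu".toList s || PySem.Chars.isIn "illust".toList s))) then "Illustrious"
     else if (PySem.Chars.isIn "xl".toList s || PySem.Chars.isIn "sdxl".toList s ||
          PySem.Chars.isIn "v1-5-xl".toList s || PySem.Chars.isIn "xl_base".toList s) then "SDXL"
     else if (PySem.Chars.isIn "1.5".toList s || PySem.Chars.isIn "v1-5".toList s ||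
          PySem.Chars.isIn "sd15".toList s) then "SD1.5"
     else if (PySem.Chars.isIn "2.1".toList s || PySem.Chars.isIn "v2".toList s ||
          PySem.Chars.isIn "sd21".toList s) then "SD2.1"
     else if PySem.Chars.isIn "flux".toList s then "Flux"
     else if (PySem.Chars.isIn "other".toList s || PySem.Chars.isIn "misc".toList s) then "Other"
     else "Unknown")
      = labelsList.getD (minIn kwTable s 6) "Unknown" := by
  cases h1 : PySem.Chars.isIn ['i', 'l', 'l', 'u', 's', 't', 'r', 'i', 'o', 'u', 's'] s
  · -- illustrious absent
    cases h2 : PySem.Chars.isIn ['i', 'l', 'l', 'u', 'b', 'a', 's', 'e'] s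
    · -- illubase absent
      cases h3 : PySem.Chars.isIn ['i', 'l', 'l', 'u'] s
      · -- illu absent
        cases h4 : PySem.Chars.isIn ['i', 'l', 'l', 'u', 's', 't'] s
        · -- illust absent
          cases h5 : PySem.Chars.isIn ['x', 'l'] s
          · -- xl absent
            cases h6 : PySem.Chars.isIn ['s', 'd', 'x', 'l'] s
            · -- sdxl absent
              cases h7 : PySem.Chars.isIn ['v', '1', '-', '5', '-', 'x', 'l'] s
              · -- v1-5-xl absent
                cases h8 : PySem.Chars.isIn ['x', 'l', '_', 'b', 'a', 's', 'e'] s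
                · -- xl_base absent
                  cases h9 : PySem.Chars.isIn ['1', '.', '5'] s
                  · -- 1.5 absent
                    cases h10 : PySem.Chars.isIn ['v', '1', '-', '5'] s
                    · -- v1-5 absent
                      cases h11 : PySem.Chars.isIn ['s', 'd', '1', '5'] s
                      · -- sd15 absent
                        cases h12 : PySem.Chars.isIn ['2', '.', '1'] s
                        · -- 2.1 absent
                          cases h13 : PySem.Chars.isIn ['v', '2'] s
                          · -- v2 absent
                            cases h14 : PySem.Chars.isIn ['s', 'd', '2', '1'] s
                            · -- sd21 absent
                              cases h15 : PySem.Chars.isIn ['f', 'l', 'u', 'x'] s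
                              · -- flux absent
                                cases h16 : PySem.Chars.isIn ['o', 't', 'h', 'e', 'r'] s
                                · -- other absent
                                  cases h17 : PySem.Chars.isIn ['m', 'i', 's', 'c'] s
                                  · -- misc absent
                                    simp [minIn, kwTable, labelsList, Nat.min_def, h1, h2, h3, h4, h5, h6, h7, h8, h9, h10, h11, h12, h13, h14, h15, h16, h17]
                                  · -- misc present: best priority settled, rest of the sweep collapses
                                    simp [minIn, kwTable, labelsList, Nat.min_def, h1, h2, h3, h4, h5, h6, h7, h8, h9, h10, h11, h12, h13, h14, h15, h16, h17]
                                · -- other present: best priority settled, rest of the sweep collapses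
                                  simp [minIn, kwTable, labelsList, Nat.min_def, h1, h2, h3, h4, h5, h6, h7, h8, h9, h10, h11, h12, h13, h14, h15, h16]
                              · -- flux present: best priority settled, rest of the sweep collapses
                                simp [minIn, kwTable, labelsList, Nat.min_def, h1, h2, h3, h4, h5, h6, h7, h8, h9, h10, h11, h12, h13, h14, h15]
                            · -- sd21 present: best priority settled, rest of the sweep collapses
                              simp [minIn, kwTable, labelsList, Nat.min_def, h1, h2, h3, h4, h5, h6, h7, h8, h9, h10, h11, h12, h13, h14]
                          · -- v2 present: best priority settled, rest of the sweep collapses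
                            simp [minIn, kwTable, labelsList, Nat.min_def, h1, h2, h3, h4, h5, h6, h7, h8, h9, h10, h11, h12, h13]
                        · -- 2.1 present: best priority settled, rest of the sweep collapses
                          simp [minIn, kwTable, labelsList, Nat.min_def, h1, h2, h3, h4, h5, h6, h7, h8, h9, h10, h11, h12]
                      · -- sd15 present: best priority settled, rest of the sweep collapses
                        simp [minIn, kwTable, labelsList, Nat.min_def, h1, h2, h3, h4, h5, h6, h7, h8, h9, h10, h11]
                    · -- v1-5 present: best priority settled, rest of the sweep collapses
                      simp [minIn, kwTable, labelsList, Nat.min_def, h1, h2, h3, h4, h5, h6, h7, h8, h9, h10]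
                  · -- 1.5 present: best priority settled, rest of the sweep collapses
                    simp [minIn, kwTable, labelsList, Nat.min_def, h1, h2, h3, h4, h5, h6, h7, h8, h9]
                · -- xl_base present: best priority settled, rest of the sweep collapses
                  simp [minIn, kwTable, labelsList, Nat.min_def, h1, h2, h3, h4, h5, h6, h7, h8]
              · -- v1-5-xl present: best priority settled, rest of the sweep collapses
                simp [minIn, kwTable, labelsList, Nat.min_def, h1, h2, h3, h4, h5, h6, h7]
            · -- sdxl present: best priority settled, rest of the sweep collapses
              simp [minIn, kwTable, labelsList, Nat.min_def, h1, h2, h3, h4, h5, h6]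
          · -- xl present: best priority settled, rest of the sweep collapses
            simp [minIn, kwTable, labelsList, Nat.min_def, h1, h2, h3, h4, h5]
        · -- illust present: best priority settled, rest of the sweep collapses
          simp [minIn, kwTable, labelsList, Nat.min_def, h1, h2, h3, h4]
      · -- illu present: best priority settled, rest of the sweep collapses
        simp [minIn, kwTable, labelsList, Nat.min_def, h1, h2, h3]
    · -- illubase present: best priority settled, rest of the sweep collapses
      simp [minIn, kwTable, labelsList, Nat.min_def, h1, h2]
  · -- illustrious present: best priority settled, rest of the sweep collapses
    simp [minIn, kwTable, labelsList, Nat.min_def, h1]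

-- ===== VERDICT (by name: the statement is the Claim_ definition above) =====
theorem detect_model_spec : Claim_equal_detect_model := by
  intro name _
  unfold Spec_detect_model detect_model detect_model_alt
  simp only [List.any_cons, List.any_nil, Bool.or_false, PySem.Str.isIn_eq]
  rw [kwScan_eq_minIn kwTable (by decide)]
  exact chain_eq (PySem.Str.lower name).toList
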